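-- pv_equiv track=rewrite | github.com/chiralcentre/Kattis | recursionrandfun.py | solve
-- ===== SOURCE A (Python) =====
-- from math import ceil
--
-- def solve(a,b,c,i,k):
--     # maximum of i steps taken, minimum of ceil(i / c) steps taken
--     L = ceil(i / c)
--     if L * a + 1 > k:
--         return "impossible"
--     for j in range(L,i + 1): # check every possible number of steps taken
--         r = k - a * j - 1 # r represents part of end number that comes from the myRNG() addition
--         if r == 0: # set both myRNG() to zero
--             return "possible"
--         t = 0
--         for m in range(b - 1, 0, -1): #try all values of myRNG() for addition part
--             t += r // m
--             r %= m
--             if r == 0: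
--                 if t <= j:
--                     return "possible"
--                 break # not possible for current j
--     return "impossible"
-- ===== SOURCE B (Python) =====
-- def solve(a, b, c, i, k):
--     # One pass over j: the greedy inner loop of A always ends with t = ceil(r/(b-1)),
--     # so replace it with that closed form; for b <= 1 only r == 0 can succeed.
--     L = -(-i // c)
--     if L * a + 1 > k:
--         return "impossible"
--     if b >= 2:
--         for j in range(L, i + 1):
--             r = k - a * j - 1
--             if r == 0 or -(-r // (b - 1)) <= j:
--                 return "possible"
--     else:
--         for j in range(L, i + 1):
--             if k - a * j - 1 == 0:
--                 return "possible"
--     return "impossible"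
-- ===== Notes on version B (the rewrite author's own statement) =====
-- stated objective: faster
-- what changed: A's inner greedy loop over RNG values m = b-1..1 always terminates with t = ceil(r/(b-1)), so B replaces the whole inner loop by that closed form (with the b<=1 case reduced to the r==0 test), turning O(i*b) into O(i).
import Mathlib
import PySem

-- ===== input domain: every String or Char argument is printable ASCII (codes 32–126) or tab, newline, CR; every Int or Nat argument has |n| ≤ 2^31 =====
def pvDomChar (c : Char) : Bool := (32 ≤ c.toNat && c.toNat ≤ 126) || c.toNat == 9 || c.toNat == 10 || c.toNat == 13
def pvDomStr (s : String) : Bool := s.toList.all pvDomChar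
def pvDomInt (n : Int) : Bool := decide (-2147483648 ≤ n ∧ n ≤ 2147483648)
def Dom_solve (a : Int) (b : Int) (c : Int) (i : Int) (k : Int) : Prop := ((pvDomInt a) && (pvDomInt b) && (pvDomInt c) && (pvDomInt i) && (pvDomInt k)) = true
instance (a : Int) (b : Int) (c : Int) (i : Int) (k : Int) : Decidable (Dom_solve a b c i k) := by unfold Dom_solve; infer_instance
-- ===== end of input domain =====

-- B replaces A's inner greedy loop (over all RNG values m = b-1..1) by the closed form
-- t = ceil(r/(b-1)); objective: faster (O(i) instead of O(i*b)).


-- ===== PORT A =====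
-- inner loop: for m in range(b-1, 0, -1): t += r // m; r %= m; if r == 0: return t <= j / break
def innerA (j : Int) : List Int → Int → Int → Bool
  | [], _, _ => false
  | m :: ms, t, r =>
    let t' := t + PySem.Int.floordiv r m
    let r' := PySem.Int.mod r m
    if r' = 0 then decide (t' ≤ j) else innerA j ms t' r'

-- outer loop: for j in range(L, i+1)
def outerA (a : Int) (b : Int) (k : Int) : List Int → Bool
  | [] => false
  | j :: js =>
    let r := k - a * j - 1
    if r = 0 then true
    else if innerA j (PySem.List.pyRange (b - 1) 0 (-1)) 0 r then true
    else outerA a b k js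

def solve (a : Int) (b : Int) (c : Int) (i : Int) (k : Int) : String :=
  -- L = math.ceil(i / c); exact integer ceiling: the float ceil in A is exact for |i|, |c| ≤ 2^31
  let L := -(PySem.Int.floordiv (-i) c)
  if L * a + 1 > k then "impossible"
  else if outerA a b k (PySem.List.pyRange L (i + 1) 1) then "possible"
  else "impossible"

-- ===== PORT B =====
def solve_alt (a : Int) (b : Int) (c : Int) (i : Int) (k : Int) : String :=
  let L := -(PySem.Int.floordiv (-i) c)
  if L * a + 1 > k then "impossible"
  else if 2 ≤ b then
    if (PySem.List.pyRange L (i + 1) 1).any (fun j =>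
        let r := k - a * j - 1
        decide (r = 0) || decide (-(PySem.Int.floordiv (-r) (b - 1)) ≤ j)) then "possible"
    else "impossible"
  else
    if (PySem.List.pyRange L (i + 1) 1).any (fun j => decide (k - a * j - 1 = 0)) then "possible"
    else "impossible"

-- ===== PRECONDITION & SPEC =====
-- A raises ZeroDivisionError (in ceil(i / c)) exactly when c = 0; nothing else is excluded.
def Pre_solve (a : Int) (b : Int) (c : Int) (i : Int) (k : Int) : Prop := c ≠ 0
instance (a : Int) (b : Int) (c : Int) (i : Int) (k : Int) : Decidable (Pre_solve a b c i k) := by unfold Pre_solve; infer_instance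
def pvWitness_solve : Int × Int × Int × Int × Int := (1, 2, 3, 4, 5)

def Spec_solve (a : Int) (b : Int) (c : Int) (i : Int) (k : Int) (out : String) : Prop := out = solve_alt a b c i k
instance (a : Int) (b : Int) (c : Int) (i : Int) (k : Int) (out : String) : Decidable (Spec_solve a b c i k out) := by unfold Spec_solve; infer_instance

-- ===== CLAIM (what is proved, stated in full; the proofs are below) =====
def Claim_equal_solve : Prop := ∀ (a : Int) (b : Int) (c : Int) (i : Int) (k : Int), Dom_solve a b c i k → Pre_solve a b c i k → Spec_solve a b c i k (solve a b c i k)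

-- ===== LEMMAS AND PROOFS =====

-- Once 0 < r ≤ d, the greedy loop over m = d, d-1, …, 1 finishes with exactly one more coin.
theorem innerA_small (d : Int) (hd : 1 ≤ d) :
    ∀ t r j : Int, 0 < r → r ≤ d →
      innerA j (PySem.List.pyRange d 0 (-1)) t r = decide (t + 1 ≤ j) := by
  induction d, hd using Int.le_induction with
  | base =>
    intro t r j h1 h2
    have hr : r = 1 := by omega
    rw [PySem.List.pyRange_neg_one_cons (by omega : (0:Int) < 1)]
    subst hr
    simp [innerA, PySem.Int.floordiv, PySem.Int.mod]
  | succ d hd ih =>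
    intro t r j h1 h2
    rw [PySem.List.pyRange_neg_one_cons (by omega : (0:Int) < d + 1)]
    by_cases hr : r = d + 1
    · subst hr
      have hfd : PySem.Int.floordiv (d + 1) (d + 1) = 1 := by
        rw [PySem.Int.floordiv_eq_iff_of_pos (by omega)]; constructor <;> nlinarith
      have hmd : PySem.Int.mod (d + 1) (d + 1) = 0 := by
        have := PySem.Int.floordiv_mul_add_mod (d + 1) (d + 1)
        rw [hfd] at this; omega
      simp [innerA, hfd, hmd]
    · have hlt : r < d + 1 := by omega
      have hfd : PySem.Int.floordiv r (d + 1) = 0 := by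
        rw [PySem.Int.floordiv_eq_iff_of_pos (by omega)]; omega
      have hmd : PySem.Int.mod r (d + 1) = r := by
        have := PySem.Int.floordiv_mul_add_mod r (d + 1)
        rw [hfd] at this; omega
      simp only [innerA, hfd, hmd, add_zero]
      rw [if_neg (by omega : ¬ r = 0)]
      rw [show d + 1 - 1 = d by ring]
      exact ih t r j h1 (by omega)

-- A's full inner loop computes the ceiling-division test.
theorem innerA_eq_ceil (d : Int) (hd : 1 ≤ d) (r j : Int) (_hr : r ≠ 0) :
    innerA j (PySem.List.pyRange d 0 (-1)) 0 r
      = decide (-(PySem.Int.floordiv (-r) d) ≤ j) := by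
  rw [PySem.List.pyRange_neg_one_cons (by omega : (0:Int) < d)]
  have heq := PySem.Int.floordiv_mul_add_mod r d
  have hm0 : 0 ≤ PySem.Int.mod r d := by
    rw [PySem.Int.mod_eq_emod_of_pos (by omega)]; exact Int.emod_nonneg r (by omega)
  have hmlt : PySem.Int.mod r d < d := by
    rw [PySem.Int.mod_eq_emod_of_pos (by omega)]; exact Int.emod_lt_of_pos r (by omega)
  by_cases hz : PySem.Int.mod r d = 0
  · -- d divides r: the first iteration already zeroes r, with t = r / d = ceil(r/d)
    have hceil : -(PySem.Int.floordiv (-r) d) = PySem.Int.floordiv r d := by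
      rw [PySem.Int.neg_floordiv_neg_eq_iff_of_pos (by omega)]
      have h2 : (PySem.Int.floordiv r d - 1) * d = PySem.Int.floordiv r d * d - d := by ring
      omega
    simp [innerA, hz, hceil]
  · -- otherwise one more coin is needed: ceil(r/d) = r // d + 1
    have hceil : -(PySem.Int.floordiv (-r) d) = PySem.Int.floordiv r d + 1 := by
      rw [PySem.Int.neg_floordiv_neg_eq_iff_of_pos (by omega)]
      have h2 : (PySem.Int.floordiv r d + 1 - 1) * d = PySem.Int.floordiv r d * d := by ring
      have h3 : (PySem.Int.floordiv r d + 1) * d = PySem.Int.floordiv r d * d + d := by ring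
      omega
    have hd2 : 1 ≤ d - 1 := by omega
    simp only [innerA, hz, if_false, zero_add, hceil]
    exact innerA_small (d - 1) hd2 _ _ j (by omega) (by omega)

-- The outer loop is a first-match scan = List.any of the per-j closed-form test.
theorem outerA_eq_any (a b k : Int) (js : List Int) :
    outerA a b k js = js.any (fun j =>
      decide (k - a * j - 1 = 0) ||
        (decide (2 ≤ b) && decide (-(PySem.Int.floordiv (-(k - a * j - 1)) (b - 1)) ≤ j))) := by
  induction js with
  | nil => simp [outerA]
  | cons j js ih =>
    simp only [outerA, List.any_cons, ← ih]
    by_cases hr : k - a * j - 1 = 0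
    · simp [hr]
    · rw [if_neg hr]
      by_cases hb : 2 ≤ b
      · rw [innerA_eq_ceil (b - 1) (by omega) _ j hr]
        by_cases hc : -(PySem.Int.floordiv (-(k - a * j - 1)) (b - 1)) ≤ j <;>
          simp [hr, hb]
      · have hnil : PySem.List.pyRange (b - 1) 0 (-1) = [] :=
          PySem.List.pyRange_neg_one_eq_nil (by omega)
        simp [hnil, innerA, hr, hb]

-- ===== VERDICT (by name: the statement is the Claim_ definition above) =====
theorem solve_spec : Claim_equal_solve := by
  intro a b c i k _ _
  unfold Spec_solve solve solve_alt
  simp only [outerA_eq_any]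
  by_cases hb : 2 ≤ b
  · have h2 : decide (2 ≤ b) = true := decide_eq_true hb
    have hfun : (fun j : Int =>
        decide (k - a * j - 1 = 0) ||
          (decide (2 ≤ b) && decide (-(PySem.Int.floordiv (-(k - a * j - 1)) (b - 1)) ≤ j)))
        = (fun j : Int =>
        decide (k - a * j - 1 = 0) ||
          decide (-(PySem.Int.floordiv (-(k - a * j - 1)) (b - 1)) ≤ j)) := by
      funext j; rw [h2, Bool.true_and]
    rw [hfun]
    simp [hb]
  · have h2 : decide (2 ≤ b) = false := decide_eq_false hb
    have hfun : (fun j : Int =>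
        decide (k - a * j - 1 = 0) ||
          (decide (2 ≤ b) && decide (-(PySem.Int.floordiv (-(k - a * j - 1)) (b - 1)) ≤ j)))
        = (fun j : Int => decide (k - a * j - 1 = 0)) := by
      funext j; rw [h2, Bool.false_and, Bool.or_false]
    rw [hfun]
    simp [hb]
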